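-- pv_equiv track=rewrite | github.com/Andrey-Bedretdinov/School | Архив/ЕГЭ/Вариант 25011978/main.py | f
-- ===== SOURCE A (Python) =====
-- def f(x):
--     l, m = 0, 0
--     while x > 0:
--         m = m + 1
--         if x % 2 != 0:
--             l = l + 1
--         x = x // 2
--     return l, m
-- ===== SOURCE B (Python) =====
-- def f(x):
--     if x <= 0:
--         return 0, 0
--     return x.bit_count(), x.bit_length()
-- ===== Notes on version B (the rewrite author's own statement) =====
-- stated objective: idiomatic
-- what changed: Replaces the explicit halving loop with its two running counters by int.bit_count()/bit_length() library calls behind a single non-positive guard.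
import Mathlib
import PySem

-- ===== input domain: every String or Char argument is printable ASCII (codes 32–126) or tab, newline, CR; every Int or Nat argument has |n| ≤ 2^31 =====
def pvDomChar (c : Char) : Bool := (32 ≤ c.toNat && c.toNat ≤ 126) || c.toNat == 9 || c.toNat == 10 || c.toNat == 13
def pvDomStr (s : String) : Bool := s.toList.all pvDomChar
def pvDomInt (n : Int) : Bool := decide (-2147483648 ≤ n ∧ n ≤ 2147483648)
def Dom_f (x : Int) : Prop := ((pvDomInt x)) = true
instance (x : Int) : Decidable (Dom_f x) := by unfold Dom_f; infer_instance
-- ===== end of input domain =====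

-- B replaces A's explicit halving loop (two running counters) with library
-- bit_count()/bit_length() calls behind a non-positive guard; idiomatic, same cost.

-- ===== PORT A =====
-- the while loop of A: state (x, l, m)
def fLoop (x l m : Int) : Int × Int :=
  if h : x > 0 then
    fLoop (PySem.Int.floordiv x 2) (if PySem.Int.mod x 2 ≠ 0 then l + 1 else l) (m + 1)
  else (l, m)
termination_by x.toNat
decreasing_by
  rw [PySem.Int.floordiv_eq_ediv_of_pos (by omega : (0:Int) < 2)]
  omega

def f (x : Int) : Int × Int := fLoop x 0 0

-- ===== PORT B =====
def f_alt (x : Int) : Int × Int :=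
  if x ≤ 0 then (0, 0)
  else ((PySem.Int.bitCount x : Int), (PySem.Int.bitLength x : Int))

-- ===== PRECONDITION & SPEC =====
def Spec_f (x : Int) (out : Int × Int) : Prop := out = f_alt x
instance (x : Int) (out : Int × Int) : Decidable (Spec_f x out) := by unfold Spec_f; infer_instance

-- ===== CLAIM (what is proved, stated in full; the proofs are below) =====
def Claim_equal_f : Prop := ∀ (x : Int), Dom_f x → Spec_f x (f x)

-- ===== LEMMAS AND PROOFS =====

theorem fLoop_eq (n : Nat) : ∀ x l m : Int, x.toNat = n → 0 ≤ x →
    fLoop x l m = (l + (PySem.Int.bitCount x : Int), m + (PySem.Int.bitLength x : Int)) := by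
  induction n using Nat.strong_induction_on with
  | _ n ih =>
    intro x l m hn hx
    rw [fLoop]
    by_cases hpos : x > 0
    · have hdiv : PySem.Int.floordiv x 2 = x / 2 :=
        PySem.Int.floordiv_eq_ediv_of_pos (by omega)
      have hlt : (PySem.Int.floordiv x 2).toNat < n := by rw [hdiv]; omega
      have hnn : 0 ≤ PySem.Int.floordiv x 2 := by rw [hdiv]; omega
      rw [dif_pos hpos, ih _ hlt _ _ _ rfl hnn]
      have hbc := PySem.Int.bitCount_of_pos hpos
      have hbl := PySem.Int.bitLength_of_pos hpos
      have hm0 : 0 ≤ PySem.Int.mod x 2 := PySem.Int.mod_nonneg x (by omega)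
      have hm2 : PySem.Int.mod x 2 < 2 := PySem.Int.mod_lt x (by omega)
      by_cases hmod : PySem.Int.mod x 2 ≠ 0
      · have h1 : PySem.Int.mod x 2 = 1 := by omega
        simp only [if_pos hmod, hbc, hbl, h1, Prod.mk.injEq]
        refine ⟨?_, ?_⟩ <;> push_cast <;> omega
      · rw [not_ne_iff] at hmod
        simp only [if_neg (not_not_intro hmod), hbc, hbl, hmod, Prod.mk.injEq]
        refine ⟨?_, ?_⟩ <;> push_cast <;> omega
    · rw [dif_neg hpos]
      have hx0 : x = 0 := by omega
      subst hx0
      simp [PySem.Int.bitCount_zero, PySem.Int.bitLength_zero]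

-- ===== VERDICT (by name: the statement is the Claim_ definition above) =====
theorem f_spec : Claim_equal_f := by
  intro x _
  unfold Spec_f f f_alt
  by_cases hx : x ≤ 0
  · rw [fLoop, dif_neg (by omega), if_pos hx]
  · rw [fLoop_eq x.toNat x 0 0 rfl (by omega), if_neg hx]
    simp
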